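-- pv_equiv track=rewrite | github.com/Manoj-548/indusvision-dashboard | consolidate_knowledge.py | _count_code_blocks
-- ===== SOURCE A (Python) =====
-- from collections import defaultdict
--
-- def _count_code_blocks(content):
--     """Count code blocks by language."""
--     code_blocks = defaultdict(int)
--     lines = content.split('\n')
--     i = 0
--     while i < len(lines):
--         if lines[i].startswith('```'):
--             lang = lines[i][3:].strip() or 'unknown'
--             code_blocks[lang] += 1
--             i += 1
--             while i < len(lines) and not lines[i].startswith('```'):
--                 i += 1
--         i += 1
--     return dict(code_blocks)
-- ===== SOURCE B (Python) =====
-- from collections import defaultdict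
--
-- def _count_code_blocks(content):
--     """Count code blocks by language (single flat pass with a toggle)."""
--     counts = defaultdict(int)
--     in_block = False
--     for line in content.split('\n'):
--         if line.startswith('```'):
--             if in_block:
--                 in_block = False
--             else:
--                 counts[line[3:].strip() or 'unknown'] += 1
--                 in_block = True
--     return dict(counts)
-- ===== Notes on version B (the rewrite author's own statement) =====
-- stated objective: simpler
-- what changed: Replaced the index-based while loop with a nested skip-loop by a single flat for-pass over the lines maintaining an in_block toggle.
import Mathlib
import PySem

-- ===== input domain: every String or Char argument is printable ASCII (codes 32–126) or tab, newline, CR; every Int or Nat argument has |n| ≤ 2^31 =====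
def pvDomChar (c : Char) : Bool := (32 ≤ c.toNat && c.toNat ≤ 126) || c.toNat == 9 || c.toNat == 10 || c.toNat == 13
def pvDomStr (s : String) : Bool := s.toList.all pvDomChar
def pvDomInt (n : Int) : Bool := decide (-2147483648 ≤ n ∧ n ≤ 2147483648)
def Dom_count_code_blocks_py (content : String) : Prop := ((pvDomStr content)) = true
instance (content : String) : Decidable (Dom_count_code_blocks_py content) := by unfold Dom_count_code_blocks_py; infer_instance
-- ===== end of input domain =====

-- B replaces A's index-based outer/inner while loops by one flat pass with an in_block toggle (objective: simpler).

-- ===== PORT A =====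
-- code_blocks[lang] += 1 where lang = lines[i][3:].strip() or 'unknown'
def pvIncrA (d : PySem.Dict String Int) (l : List Char) : PySem.Dict String Int :=
  let lang0 := PySem.Chars.strip (PySem.Chars.slice l (some 3) none)
  let lang := if lang0 = [] then "unknown" else String.mk lang0
  d.insert lang (d.getD lang 0 + 1)

mutual
-- outer while: at line i, not inside a block
def pvALoop (d : PySem.Dict String Int) : List (List Char) → PySem.Dict String Int
  | [] => d
  | l :: ls =>
    if PySem.Chars.startswith l ['`','`','`'] then pvASkip (pvIncrA d l) ls
    else pvALoop d ls
-- inner while (skip to closing fence), plus the outer i += 1 that steps over it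
def pvASkip (d : PySem.Dict String Int) : List (List Char) → PySem.Dict String Int
  | [] => d
  | l :: ls =>
    if PySem.Chars.startswith l ['`','`','`'] then pvALoop d ls
    else pvASkip d ls
end

def count_code_blocks_py (content : String) : List (String × Int) :=
  (pvALoop PySem.Dict.empty (PySem.Chars.splitOn content.toList ['\n'])).items

-- ===== PORT B =====
-- one step of the flat for-loop: state = (counts, in_block)
def pvBStep (s : PySem.Dict String Int × Bool) (l : List Char) : PySem.Dict String Int × Bool :=
  if PySem.Chars.startswith l ['`','`','`'] then
    if s.2 then (s.1, false)
    else
      let lang0 := PySem.Chars.strip (PySem.Chars.slice l (some 3) none)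
      let lang := if lang0 = [] then "unknown" else String.mk lang0
      (s.1.insert lang (s.1.getD lang 0 + 1), true)
  else s

def count_code_blocks_py_alt (content : String) : List (String × Int) :=
  ((PySem.Chars.splitOn content.toList ['\n']).foldl pvBStep (PySem.Dict.empty, false)).1.items

-- ===== PRECONDITION & SPEC =====
def Spec_count_code_blocks_py (content : String) (out : List (String × Int)) : Prop := out = count_code_blocks_py_alt content
instance (content : String) (out : List (String × Int)) : Decidable (Spec_count_code_blocks_py content out) := by unfold Spec_count_code_blocks_py; infer_instance

-- ===== CLAIM (what is proved, stated in full; the proofs are below) =====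
def Claim_equal_count_code_blocks_py : Prop := ∀ (content : String), Dom_count_code_blocks_py content → Spec_count_code_blocks_py content (count_code_blocks_py content)

-- ===== LEMMAS AND PROOFS =====
-- A's outer loop is B's fold started with in_block = false; A's skip loop is B's fold with in_block = true.
theorem pvLoop_eq_fold (ls : List (List Char)) :
    (∀ d, pvALoop d ls = (ls.foldl pvBStep (d, false)).1) ∧
    (∀ d, pvASkip d ls = (ls.foldl pvBStep (d, true)).1) := by
  induction ls with
  | nil => exact ⟨fun d => rfl, fun d => rfl⟩
  | cons l ls ih =>
    constructor <;> intro d <;>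
      by_cases h : PySem.Chars.startswith l ['`','`','`'] = true <;>
        simp [pvALoop, pvASkip, pvBStep, h, ih.1, ih.2, pvIncrA]

-- ===== VERDICT (by name: the statement is the Claim_ definition above) =====
theorem count_code_blocks_py_spec : Claim_equal_count_code_blocks_py := by
  intro content _
  unfold Spec_count_code_blocks_py count_code_blocks_py count_code_blocks_py_alt
  rw [(pvLoop_eq_fold _).1]
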